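-- pv_equiv track=rewrite | github.com/Sof69lab/CRDservice_2.0 | formapp/views.py | spec_length
-- ===== SOURCE A (Python) =====
-- def spec_length(string_num):
--     l = 0
--     for i in string_num:
--         if i in '0123456789':
--             l += 1
--         if i == '[':
--             break
--     return l
-- ===== SOURCE B (Python) =====
-- def spec_length(string_num):
--     acc = 0
--     for c in reversed(string_num):
--         if c == '[':
--             acc = 0
--         elif c in '0123456789':
--             acc += 1
--     return acc
-- ===== Notes on version B (the rewrite author's own statement) =====
-- stated objective: alternative
-- what changed: Scans the string right-to-left and resets the accumulator to 0 at every '[', so the final value is the digit count before the first '['; no early break and no boundary search.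
import Mathlib
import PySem

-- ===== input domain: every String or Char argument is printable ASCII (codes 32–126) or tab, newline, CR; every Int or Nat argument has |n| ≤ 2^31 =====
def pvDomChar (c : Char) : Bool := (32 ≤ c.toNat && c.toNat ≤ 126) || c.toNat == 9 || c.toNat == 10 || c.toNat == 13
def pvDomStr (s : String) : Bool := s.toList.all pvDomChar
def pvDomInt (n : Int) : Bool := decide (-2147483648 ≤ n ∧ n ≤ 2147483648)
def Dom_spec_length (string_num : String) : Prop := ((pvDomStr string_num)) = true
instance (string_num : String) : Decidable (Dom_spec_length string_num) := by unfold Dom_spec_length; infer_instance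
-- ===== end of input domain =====

-- B scans right-to-left with an accumulator reset to 0 at every '[' instead of A's left-to-right loop with early break; objective: alternative (same cost, different traversal).


-- ===== PORT A =====
-- A's loop over the characters: running counter, early break at '['.
def specLengthLoop : List Char → Int → Int
  | [], l => l
  | c :: rest, l =>
    let l' := if c ∈ "0123456789".toList then l + 1 else l
    if c = '[' then l' else specLengthLoop rest l'

def spec_length (string_num : String) : Int :=
  specLengthLoop string_num.toList 0

-- ===== PORT B =====
-- B: for c in reversed(string_num): acc = 0 if c == '[' else acc + (c in digits).
def spec_length_alt (string_num : String) : Int :=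
  string_num.toList.reverse.foldl
    (fun acc c => if c = '[' then 0 else if c ∈ "0123456789".toList then acc + 1 else acc) 0

-- ===== PRECONDITION & SPEC =====
def Spec_spec_length (string_num : String) (out : Int) : Prop := out = spec_length_alt string_num
instance (string_num : String) (out : Int) : Decidable (Spec_spec_length string_num out) := by unfold Spec_spec_length; infer_instance

-- ===== CLAIM (what is proved, stated in full; the proofs are below) =====
def Claim_equal_spec_length : Prop := ∀ (string_num : String), Dom_spec_length string_num → Spec_spec_length string_num (spec_length string_num)

-- ===== LEMMAS AND PROOFS =====
-- Common characterisation: the number of digits in the prefix before the first '['.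
def digitPrefixCount (cs : List Char) : Int :=
  ((cs.takeWhile (fun c => c ≠ '[')).countP (fun c => c ∈ "0123456789".toList) : Nat)

lemma specLengthLoop_eq (cs : List Char) (l : Int) :
    specLengthLoop cs l = l + digitPrefixCount cs := by
  induction cs generalizing l with
  | nil => simp [specLengthLoop, digitPrefixCount]
  | cons c rest ih =>
    by_cases hc : c = '['
    · subst hc
      simp [specLengthLoop, digitPrefixCount, List.takeWhile]
    · rw [specLengthLoop, if_neg hc, ih]
      unfold digitPrefixCount
      rw [List.takeWhile_cons_of_pos (by simp [hc]), List.countP_cons]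
      split_ifs <;> simp_all <;> push_cast <;> ring

lemma foldr_reset_eq (cs : List Char) :
    cs.foldr (fun c acc => if c = '[' then 0 else
        if c ∈ "0123456789".toList then acc + 1 else acc) (0 : Int)
      = digitPrefixCount cs := by
  induction cs with
  | nil => simp [digitPrefixCount]
  | cons c rest ih =>
    by_cases hc : c = '['
    · subst hc
      simp [digitPrefixCount, List.takeWhile]
    · rw [List.foldr_cons, if_neg hc, ih]
      unfold digitPrefixCount
      rw [List.takeWhile_cons_of_pos (by simp [hc]), List.countP_cons]
      split_ifs <;> simp_all <;> push_cast <;> ring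

-- ===== VERDICT (by name: the statement is the Claim_ definition above) =====
theorem spec_length_spec : Claim_equal_spec_length := by
  intro s _
  unfold Spec_spec_length spec_length spec_length_alt
  rw [List.foldl_reverse, specLengthLoop_eq, foldr_reset_eq]
  simp
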